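-- pv_equiv track=rewrite | github.com/telendt/adventofcode | day11/solution.py | has_three_inc
-- ===== SOURCE A (Python) =====
-- def has_three_inc(s: str) -> bool:
--     r"""Check if s has one increasing straight of at least 3 chars.
--
--     >>> has_three_inc('hijklmmn')
--     True
--     >>> has_three_inc('abbceffg')
--     False
--     """
--     prev = -2
--     cnt = 2
--     for o in map(ord, s):
--         cnt = (cnt - 1) if (o - prev) == 1 else 2
--         if cnt == 0:
--             return True
--         prev = o
--     return False
-- ===== SOURCE B (Python) =====
-- def has_three_inc(s: str) -> bool:
--     o = list(map(ord, s))
--     return any(b == a + 1 and c == b + 1 for a, b, c in zip(o, o[1:], o[2:]))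
-- ===== Notes on version B (the rewrite author's own statement) =====
-- stated objective: simpler
-- what changed: B checks each overlapping character triple independently via zip of shifted code lists and any(), instead of A's stateful scan with a running countdown counter and early return.
import Mathlib
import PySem

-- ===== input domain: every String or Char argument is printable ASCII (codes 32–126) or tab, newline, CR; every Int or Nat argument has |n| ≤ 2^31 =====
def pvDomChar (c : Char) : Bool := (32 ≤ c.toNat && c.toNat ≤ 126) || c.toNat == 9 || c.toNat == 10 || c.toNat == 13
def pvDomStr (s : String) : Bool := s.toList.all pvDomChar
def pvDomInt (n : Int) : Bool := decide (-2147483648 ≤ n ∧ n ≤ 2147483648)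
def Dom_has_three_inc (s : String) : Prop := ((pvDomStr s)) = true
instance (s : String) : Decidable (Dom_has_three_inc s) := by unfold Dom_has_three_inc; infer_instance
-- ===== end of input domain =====

-- B checks each overlapping character triple independently (zip of shifted lists + any) instead of A's stateful countdown scan.

-- ===== PORT A =====
-- A's for-loop with early return, as structural recursion over the ord list with state (prev, cnt)
def pvLoopA : List Int → Int → Int → Bool
  | [], _, _ => false
  | o :: rest, prev, cnt =>
    let cnt' := if o - prev = 1 then cnt - 1 else 2
    if cnt' = 0 then true else pvLoopA rest o cnt'

def has_three_inc (s : String) : Bool :=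
  pvLoopA (s.toList.map (fun c => (c.toNat : Int))) (-2) 2

-- ===== PORT B =====
def has_three_inc_alt (s : String) : Bool :=
  let o := s.toList.map (fun c => (c.toNat : Int))
  (o.zip (o.tail.zip o.tail.tail)).any (fun t => t.2.1 == t.1 + 1 && t.2.2 == t.2.1 + 1)

-- ===== PRECONDITION & SPEC =====
def Spec_has_three_inc (s : String) (out : Bool) : Prop := out = has_three_inc_alt s
instance (s : String) (out : Bool) : Decidable (Spec_has_three_inc s out) := by unfold Spec_has_three_inc; infer_instance

-- ===== CLAIM (what is proved, stated in full; the proofs are below) =====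
def Claim_equal_has_three_inc : Prop := ∀ (s : String), Dom_has_three_inc s → Spec_has_three_inc s (has_three_inc s)

-- ===== LEMMAS AND PROOFS =====

-- "some adjacent triple of l is increasing", the common characterisation of both ports
def triAny : List Int → Bool
  | a :: b :: c :: rest => (b == a + 1 && c == b + 1) || triAny (b :: c :: rest)
  | _ => false

theorem zipAny_eq_triAny : ∀ (l : List Int),
    ((l.zip (l.tail.zip l.tail.tail)).any (fun t => t.2.1 == t.1 + 1 && t.2.2 == t.2.1 + 1)) = triAny l
  | [] => rfl
  | [_] => rfl
  | [_, _] => rfl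
  | a :: b :: c :: rest => by
    have ih := zipAny_eq_triAny (b :: c :: rest)
    simp only [List.tail_cons, List.zip_cons_cons, List.any_cons] at ih ⊢
    rw [ih, triAny]

theorem triAny_cons_skip (p a : Int) (rest : List Int) (h : (a == p + 1) = false) :
    triAny (p :: a :: rest) = triAny (a :: rest) := by
  cases rest with
  | nil => rfl
  | cons b t => rw [triAny]; simp [h]

theorem loopA_eq_triAny : ∀ (l : List Int) (p : Int),
    pvLoopA l p 2 = triAny (p :: l) ∧ pvLoopA l p 1 = triAny ((p - 1) :: p :: l)
  | [], p => by simp [pvLoopA, triAny]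
  | a :: rest, p => by
    have ih := loopA_eq_triAny rest a
    by_cases h : a - p = 1
    · have ha : a = p + 1 := by omega
      subst ha
      constructor
      · show pvLoopA ((p + 1) :: rest) p 2 = triAny (p :: (p + 1) :: rest)
        rw [pvLoopA]
        simp only [add_sub_cancel_left, if_pos, show (2:Int) - 1 = 1 by norm_num]
        norm_num
        rw [ih.2]
        simp [add_sub_cancel_right]
      · show pvLoopA ((p + 1) :: rest) p 1 = triAny ((p - 1) :: p :: (p + 1) :: rest)
        rw [pvLoopA]
        simp only [add_sub_cancel_left, if_pos, show (1:Int) - 1 = 0 by norm_num]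
        rw [triAny]
        simp
    · have hne : (a == p + 1) = false := by simp; omega
      constructor
      · show pvLoopA (a :: rest) p 2 = triAny (p :: a :: rest)
        rw [pvLoopA]
        simp only [h, if_false]
        norm_num
        rw [ih.1, triAny_cons_skip p a rest hne]
      · show pvLoopA (a :: rest) p 1 = triAny ((p - 1) :: p :: a :: rest)
        rw [pvLoopA]
        simp only [h, if_false]
        norm_num
        rw [ih.1, triAny]
        simp [hne, triAny_cons_skip p a rest hne]

theorem triAny_neg_two_cons (l : List Int) (hl : ∀ x ∈ l, 0 ≤ x) :
    triAny ((-2 : Int) :: l) = triAny l := by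
  cases l with
  | nil => rfl
  | cons a t =>
    cases t with
    | nil => rfl
    | cons b u =>
      have ha : 0 ≤ a := hl a (by simp)
      have hne : (a == (-2 : Int) + 1) = false := by simp; omega
      rw [triAny, hne]
      simp

-- ===== VERDICT (by name: the statement is the Claim_ definition above) =====
theorem has_three_inc_spec : Claim_equal_has_three_inc := by
  intro s _
  unfold Spec_has_three_inc has_three_inc has_three_inc_alt
  rw [zipAny_eq_triAny, (loopA_eq_triAny _ _).1, triAny_neg_two_cons]
  intro x hx
  simp only [List.mem_map] at hx
  obtain ⟨c, _, rfl⟩ := hx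
  exact Int.natCast_nonneg _
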